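-- pv_equiv track=rewrite | github.com/matteusmoreira/whatpress-crm | backend/whatsapp/providers/uazapi/helpers.py | normalize_base_url
-- ===== SOURCE A (Python) =====
-- def normalize_base_url(base_url: str) -> str:
--     """Normaliza URL base removendo sufixos de versão e paths."""
--     raw = str(base_url or "").strip()
--     if not raw:
--         return ""
--
--     b = raw.rstrip("/")
--     lowered = b.lower()
--     for marker in ("/instance", "/message", "/send", "/webhook", "/group", "/chat"):
--         if lowered.endswith(marker):
--             b = b[: -len(marker)]
--             break
--
--     return b.rstrip("/")
-- ===== SOURCE B (Python) =====
-- _SEGMENTS = {"instance", "message", "send", "webhook", "group", "chat"}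
--
--
-- def normalize_base_url(base_url: str) -> str:
--     """Normaliza URL base removendo sufixos de versão e paths."""
--     raw = str(base_url or "").strip()
--     if not raw:
--         return ""
--     b = raw.rstrip("/")
--     head, sep, tail = b.rpartition("/")
--     if sep and tail.lower() in _SEGMENTS:
--         b = head
--     return b.rstrip("/")
-- ===== Notes on version B (the rewrite author's own statement) =====
-- stated objective: idiomatic
-- what changed: A's for-loop over the six slash-prefixed markers with endswith and slicing is replaced by one rpartition at the last slash plus a membership test of the lowered final path segment in a set.
import Mathlib
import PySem

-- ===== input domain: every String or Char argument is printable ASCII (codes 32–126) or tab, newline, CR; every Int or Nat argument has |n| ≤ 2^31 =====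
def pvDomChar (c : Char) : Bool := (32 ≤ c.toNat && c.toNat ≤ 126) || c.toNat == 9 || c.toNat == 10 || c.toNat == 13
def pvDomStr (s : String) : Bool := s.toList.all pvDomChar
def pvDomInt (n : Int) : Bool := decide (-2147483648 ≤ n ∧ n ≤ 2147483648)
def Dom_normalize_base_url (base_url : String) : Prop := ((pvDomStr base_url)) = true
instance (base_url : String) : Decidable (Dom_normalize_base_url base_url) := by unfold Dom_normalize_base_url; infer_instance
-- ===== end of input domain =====

-- B replaces A's endswith-loop over the six slash-prefixed markers by one rpartition at the last
-- slash plus a set membership test on the lowered final path segment (objective: idiomatic).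

-- s.rstrip("/"), ported by hand on code points (exact: drops exactly the trailing '/' characters)
def pvRstripSlashL (l : List Char) : List Char :=
  (l.reverse.dropWhile (fun c => c == '/')).reverse

def pvRstripSlash (s : String) : String := String.ofList (pvRstripSlashL s.toList)

-- ===== PORT A =====
def pvMarkers : List String := ["/instance", "/message", "/send", "/webhook", "/group", "/chat"]

-- the for-loop over the marker tuple: first matching suffix is cut, then break
def pvSuffixLoop (b lowered : String) : List String → String
  | [] => b
  | m :: ms =>
      if PySem.Str.endswith lowered m then
        PySem.Str.slice b none (some (-(PySem.Str.len m : Int)))   -- b[: -len(m)]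
      else pvSuffixLoop b lowered ms

def normalize_base_url (base_url : String) : String :=
  -- raw = str(base_url or "").strip(): on a str argument, 'base_url or ""' is base_url itself
  -- when non-empty and "" otherwise, so raw = base_url.strip() in both cases
  let raw := PySem.Str.strip base_url
  if raw = "" then ""
  else
    let b := pvRstripSlash raw
    let lowered := PySem.Str.lower b
    pvRstripSlash (pvSuffixLoop b lowered pvMarkers)

-- ===== PORT B =====
def pvSegments : List String := ["instance", "message", "send", "webhook", "group", "chat"]

-- b.rpartition("/") = (head, sep, tail), ported by hand on code points
-- (exact for the one-character separator "/")
def pvRPartSlash (s : String) : String × String × String :=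
  let rev := s.toList.reverse
  let t := rev.takeWhile (fun c => !(c == '/'))
  if t.length = rev.length then ("", "", s)
  else (String.ofList ((rev.drop (t.length + 1)).reverse), "/", String.ofList t.reverse)

def normalize_base_url_alt (base_url : String) : String :=
  let raw := PySem.Str.strip base_url
  if raw = "" then ""
  else
    let b := pvRstripSlash raw
    let p := pvRPartSlash b
    let b' := if p.2.1 ≠ "" ∧ pvSegments.contains (PySem.Str.lower p.2.2) then p.1 else b
    pvRstripSlash b'

-- ===== PRECONDITION & SPEC =====
def Spec_normalize_base_url (base_url : String) (out : String) : Prop := out = normalize_base_url_alt base_url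
instance (base_url : String) (out : String) : Decidable (Spec_normalize_base_url base_url out) := by unfold Spec_normalize_base_url; infer_instance

-- ===== CLAIM (what is proved, stated in full; the proofs are below) =====
def Claim_equal_normalize_base_url : Prop := ∀ (base_url : String), Dom_normalize_base_url base_url → Spec_normalize_base_url base_url (normalize_base_url base_url)

-- ===== LEMMAS AND PROOFS =====

-- lowering a character yields '/' only for '/'
theorem pvLowerChar_eq_slash (c : Char) : PySem.Chars.lowerChar c = '/' ↔ c = '/' := by
  unfold PySem.Chars.lowerChar PySem.Chars.isupper
  split
  · rename_i h
    simp only [Bool.and_eq_true, decide_eq_true_eq] at h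
    have h1 : 65 ≤ c.toNat := by
      have := h.1; rw [Char.le_def] at this; exact UInt32.le_iff_toNat_le.mp this
    have h2 : c.toNat ≤ 90 := by
      have := h.2; rw [Char.le_def] at this; exact UInt32.le_iff_toNat_le.mp this
    constructor
    · intro he
      exfalso
      have ht := congrArg Char.toNat he
      rw [Char.toNat_ofNat] at ht
      rw [if_pos (Or.inl (by omega))] at ht
      have hs : ('/' : Char).toNat = 47 := by decide
      omega
    · intro he
      exfalso
      subst he
      have : (47 : Nat) = ('/' : Char).toNat := by decide
      omega
  · exact Iff.rfl

-- the core combinatorial fact: "s' ++ ['/'] is a prefix of the lowered reversed string"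
-- is exactly "the chunk before the first '/' lowers to s', and there is a '/'"
theorem pvLowerSlash : PySem.Chars.lowerChar '/' = '/' := by decide

theorem pvPrefIff (rev s' : List Char) (h : '/' ∉ s') :
    s' ++ ['/'] <+: rev.map PySem.Chars.lowerChar ↔
      ((rev.takeWhile (fun c => !(c == '/'))).map PySem.Chars.lowerChar = s' ∧
        ¬ (rev.takeWhile (fun c => !(c == '/'))).length = rev.length) := by
  induction rev generalizing s' with
  | nil =>
      simp [List.takeWhile]
  | cons c r ih =>
      rw [List.takeWhile_cons]
      by_cases hc : c = '/'
      · subst hc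
        simp only [beq_self_eq_true, Bool.not_true]
        cases s' with
        | nil =>
            simp [List.cons_prefix_cons, pvLowerSlash]
        | cons a s₂ =>
            have ha : a ≠ '/' := by intro he; exact h (he ▸ List.mem_cons_self ..)
            simp only [List.cons_append, List.map_cons, List.cons_prefix_cons, pvLowerSlash,
              List.length_cons]
            constructor
            · rintro ⟨hae, -⟩
              exact absurd hae ha
            · rintro ⟨he, -⟩
              exact absurd he (by simp)
      · rw [if_pos (by simpa using hc)]
        cases s' with
        | nil =>
            simp only [List.nil_append, List.map_cons, List.cons_prefix_cons,
              List.length_cons]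
            constructor
            · rintro ⟨he, -⟩
              exact absurd ((pvLowerChar_eq_slash c).mp he.symm) hc
            · rintro ⟨he, -⟩
              exact absurd he (by simp)
        | cons a s₂ =>
            have h2 : '/' ∉ s₂ := fun hm => h (List.mem_cons_of_mem _ hm)
            simp only [List.cons_append, List.map_cons, List.cons_prefix_cons,
              List.length_cons, List.cons.injEq]
            rw [ih s₂ h2]
            constructor
            · rintro ⟨hae, hp, hl⟩
              exact ⟨⟨hae.symm, hp⟩, by omega⟩
            · rintro ⟨⟨hae, hp⟩, hl⟩
              exact ⟨hae.symm, hp, by omega⟩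

-- endswith on the lowered string, characterised by the final segment
theorem pvEndswithIff (b : String) (m : String) (seg : List Char)
    (hm : m.toList = '/' :: seg) (hseg : '/' ∉ seg) :
    (PySem.Str.endswith (PySem.Str.lower b) m = true ↔
      ((b.toList.reverse.takeWhile (fun c => !(c == '/'))).map PySem.Chars.lowerChar = seg.reverse ∧
        ¬ (b.toList.reverse.takeWhile (fun c => !(c == '/'))).length = b.toList.reverse.length)) := by
  unfold PySem.Str.endswith
  rw [PySem.Chars.endswith_iff, hm, PySem.Str.toList_lower]
  unfold PySem.Chars.lower
  rw [← List.reverse_prefix, List.reverse_cons, ← List.map_reverse]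
  exact pvPrefIff b.toList.reverse seg.reverse (by simpa using hseg)

-- the cut b[: -len(m)] equals the head of the rpartition, given the matched segment's length
theorem pvSliceEqHead (b : String) (m : String) (seg : List Char)
    (hm : m.toList = '/' :: seg)
    (hlen : (b.toList.reverse.takeWhile (fun c => !(c == '/'))).length = seg.length) :
    PySem.Str.slice b none (some (-(PySem.Str.len m : Int))) =
      String.ofList ((b.toList.reverse.drop
        ((b.toList.reverse.takeWhile (fun c => !(c == '/'))).length + 1)).reverse) := by
  have hlm : PySem.Str.len m = ((seg.length + 1 : Nat) : Int) := by
    unfold PySem.Str.len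
    rw [hm]; push_cast; simp
  apply String.toList_injective
  rw [PySem.Str.toList_slice, String.toList_ofList, PySem.Chars.slice_eq_listSlice]
  rw [hlm, hlen]
  rw [PySem.List.slice_to_neg_natCast _ _ (Nat.succ_pos _)]
  rw [List.drop_reverse, List.reverse_reverse]

-- String.ofList equality with a literal, via toList
theorem pvOfListEq (l : List Char) (s : String) : String.ofList l = s ↔ l = s.toList := by
  constructor
  · intro h; have := congrArg String.toList h; simpa using this
  · intro h; subst h; exact String.ofList_toList

theorem pvContainsIff (x : String) : pvSegments.contains x = true ↔
    (x = "instance" ∨ x = "message" ∨ x = "send" ∨ x = "webhook" ∨ x = "group" ∨ x = "chat") := by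
  simp [pvSegments]

theorem pvCore (b : String) :
    pvSuffixLoop b (PySem.Str.lower b) pvMarkers =
      (if (pvRPartSlash b).2.1 ≠ "" ∧ pvSegments.contains (PySem.Str.lower (pvRPartSlash b).2.2) then (pvRPartSlash b).1 else b) := by
  by_cases hs : (b.toList.reverse.takeWhile (fun c => !(c == '/'))).length = b.toList.reverse.length
  · -- no "/" in b: the rpartition keeps b and every endswith test fails
    have hB : pvRPartSlash b = ("", "", b) := by
      unfold pvRPartSlash; rw [if_pos hs]
    have hf : ∀ (m : String) (seg : List Char), m.toList = '/' :: seg → '/' ∉ seg →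
        PySem.Str.endswith (PySem.Str.lower b) m = false := by
      intro m seg hm hseg
      rw [Bool.eq_false_iff]
      intro he
      exact ((pvEndswithIff b m seg hm hseg).mp he).2 hs
    rw [hB]
    simp only [ne_eq, not_true_eq_false, false_and, if_false]
    simp only [pvMarkers, pvSuffixLoop,
      hf "/instance" "instance".toList rfl (by decide),
      hf "/message" "message".toList rfl (by decide),
      hf "/send" "send".toList rfl (by decide),
      hf "/webhook" "webhook".toList rfl (by decide),
      hf "/group" "group".toList rfl (by decide),
      hf "/chat" "chat".toList rfl (by decide),
      Bool.false_eq_true, if_false]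
  · -- b has a "/": compare the matched marker with the lowered final segment
    have he0 : PySem.Str.endswith (PySem.Str.lower b) "/instance" = true ↔
        ((b.toList.reverse.takeWhile (fun c => !(c == '/'))).map PySem.Chars.lowerChar) = "instance".toList.reverse := by
      rw [pvEndswithIff b "/instance" "instance".toList rfl (by decide)]
      exact and_iff_left hs
    have he1 : PySem.Str.endswith (PySem.Str.lower b) "/message" = true ↔
        ((b.toList.reverse.takeWhile (fun c => !(c == '/'))).map PySem.Chars.lowerChar) = "message".toList.reverse := by
      rw [pvEndswithIff b "/message" "message".toList rfl (by decide)]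
      exact and_iff_left hs
    have he2 : PySem.Str.endswith (PySem.Str.lower b) "/send" = true ↔
        ((b.toList.reverse.takeWhile (fun c => !(c == '/'))).map PySem.Chars.lowerChar) = "send".toList.reverse := by
      rw [pvEndswithIff b "/send" "send".toList rfl (by decide)]
      exact and_iff_left hs
    have he3 : PySem.Str.endswith (PySem.Str.lower b) "/webhook" = true ↔
        ((b.toList.reverse.takeWhile (fun c => !(c == '/'))).map PySem.Chars.lowerChar) = "webhook".toList.reverse := by
      rw [pvEndswithIff b "/webhook" "webhook".toList rfl (by decide)]
      exact and_iff_left hs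
    have he4 : PySem.Str.endswith (PySem.Str.lower b) "/group" = true ↔
        ((b.toList.reverse.takeWhile (fun c => !(c == '/'))).map PySem.Chars.lowerChar) = "group".toList.reverse := by
      rw [pvEndswithIff b "/group" "group".toList rfl (by decide)]
      exact and_iff_left hs
    have he5 : PySem.Str.endswith (PySem.Str.lower b) "/chat" = true ↔
        ((b.toList.reverse.takeWhile (fun c => !(c == '/'))).map PySem.Chars.lowerChar) = "chat".toList.reverse := by
      rw [pvEndswithIff b "/chat" "chat".toList rfl (by decide)]
      exact and_iff_left hs
    have hB : pvRPartSlash b = (String.ofList ((b.toList.reverse.drop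
        ((b.toList.reverse.takeWhile (fun c => !(c == '/'))).length + 1)).reverse), "/",
        String.ofList (b.toList.reverse.takeWhile (fun c => !(c == '/'))).reverse) := by
      unfold pvRPartSlash; rw [if_neg hs]
    rw [hB]
    have hlow : PySem.Str.lower (String.ofList (b.toList.reverse.takeWhile (fun c => !(c == '/'))).reverse)
        = String.ofList ((b.toList.reverse.takeWhile (fun c => !(c == '/'))).map PySem.Chars.lowerChar).reverse := by
      unfold PySem.Str.lower PySem.Chars.lower
      rw [String.toList_ofList, List.map_reverse]
    simp only [hlow]
    by_cases h0 : ((b.toList.reverse.takeWhile (fun c => !(c == '/'))).map PySem.Chars.lowerChar) = "instance".toList.reverse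
    · have hcont : pvSegments.contains (String.ofList ((b.toList.reverse.takeWhile (fun c => !(c == '/'))).map PySem.Chars.lowerChar).reverse) = true := by
        rw [h0, List.reverse_reverse]; decide
      rw [if_pos ⟨by decide, hcont⟩]
      simp only [pvMarkers, pvSuffixLoop,
        he0.mpr h0, if_true]
      exact pvSliceEqHead b "/instance" "instance".toList rfl (by
        have := congrArg List.length h0; simpa using this)
    by_cases h1 : ((b.toList.reverse.takeWhile (fun c => !(c == '/'))).map PySem.Chars.lowerChar) = "message".toList.reverse
    · have hcont : pvSegments.contains (String.ofList ((b.toList.reverse.takeWhile (fun c => !(c == '/'))).map PySem.Chars.lowerChar).reverse) = true := by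
        rw [h1, List.reverse_reverse]; decide
      rw [if_pos ⟨by decide, hcont⟩]
      simp only [pvMarkers, pvSuffixLoop,
        (Bool.eq_false_iff.mpr (fun hh => h0 (he0.mp hh)) : PySem.Str.endswith (PySem.Str.lower b) "/instance" = false),
        he1.mpr h1, if_true, Bool.false_eq_true, if_false]
      exact pvSliceEqHead b "/message" "message".toList rfl (by
        have := congrArg List.length h1; simpa using this)
    by_cases h2 : ((b.toList.reverse.takeWhile (fun c => !(c == '/'))).map PySem.Chars.lowerChar) = "send".toList.reverse
    · have hcont : pvSegments.contains (String.ofList ((b.toList.reverse.takeWhile (fun c => !(c == '/'))).map PySem.Chars.lowerChar).reverse) = true := by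
        rw [h2, List.reverse_reverse]; decide
      rw [if_pos ⟨by decide, hcont⟩]
      simp only [pvMarkers, pvSuffixLoop,
        (Bool.eq_false_iff.mpr (fun hh => h0 (he0.mp hh)) : PySem.Str.endswith (PySem.Str.lower b) "/instance" = false),
        (Bool.eq_false_iff.mpr (fun hh => h1 (he1.mp hh)) : PySem.Str.endswith (PySem.Str.lower b) "/message" = false),
        he2.mpr h2, if_true, Bool.false_eq_true, if_false]
      exact pvSliceEqHead b "/send" "send".toList rfl (by
        have := congrArg List.length h2; simpa using this)
    by_cases h3 : ((b.toList.reverse.takeWhile (fun c => !(c == '/'))).map PySem.Chars.lowerChar) = "webhook".toList.reverse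
    · have hcont : pvSegments.contains (String.ofList ((b.toList.reverse.takeWhile (fun c => !(c == '/'))).map PySem.Chars.lowerChar).reverse) = true := by
        rw [h3, List.reverse_reverse]; decide
      rw [if_pos ⟨by decide, hcont⟩]
      simp only [pvMarkers, pvSuffixLoop,
        (Bool.eq_false_iff.mpr (fun hh => h0 (he0.mp hh)) : PySem.Str.endswith (PySem.Str.lower b) "/instance" = false),
        (Bool.eq_false_iff.mpr (fun hh => h1 (he1.mp hh)) : PySem.Str.endswith (PySem.Str.lower b) "/message" = false),
        (Bool.eq_false_iff.mpr (fun hh => h2 (he2.mp hh)) : PySem.Str.endswith (PySem.Str.lower b) "/send" = false),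
        he3.mpr h3, if_true, Bool.false_eq_true, if_false]
      exact pvSliceEqHead b "/webhook" "webhook".toList rfl (by
        have := congrArg List.length h3; simpa using this)
    by_cases h4 : ((b.toList.reverse.takeWhile (fun c => !(c == '/'))).map PySem.Chars.lowerChar) = "group".toList.reverse
    · have hcont : pvSegments.contains (String.ofList ((b.toList.reverse.takeWhile (fun c => !(c == '/'))).map PySem.Chars.lowerChar).reverse) = true := by
        rw [h4, List.reverse_reverse]; decide
      rw [if_pos ⟨by decide, hcont⟩]
      simp only [pvMarkers, pvSuffixLoop,
        (Bool.eq_false_iff.mpr (fun hh => h0 (he0.mp hh)) : PySem.Str.endswith (PySem.Str.lower b) "/instance" = false),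
        (Bool.eq_false_iff.mpr (fun hh => h1 (he1.mp hh)) : PySem.Str.endswith (PySem.Str.lower b) "/message" = false),
        (Bool.eq_false_iff.mpr (fun hh => h2 (he2.mp hh)) : PySem.Str.endswith (PySem.Str.lower b) "/send" = false),
        (Bool.eq_false_iff.mpr (fun hh => h3 (he3.mp hh)) : PySem.Str.endswith (PySem.Str.lower b) "/webhook" = false),
        he4.mpr h4, if_true, Bool.false_eq_true, if_false]
      exact pvSliceEqHead b "/group" "group".toList rfl (by
        have := congrArg List.length h4; simpa using this)
    by_cases h5 : ((b.toList.reverse.takeWhile (fun c => !(c == '/'))).map PySem.Chars.lowerChar) = "chat".toList.reverse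
    · have hcont : pvSegments.contains (String.ofList ((b.toList.reverse.takeWhile (fun c => !(c == '/'))).map PySem.Chars.lowerChar).reverse) = true := by
        rw [h5, List.reverse_reverse]; decide
      rw [if_pos ⟨by decide, hcont⟩]
      simp only [pvMarkers, pvSuffixLoop,
        (Bool.eq_false_iff.mpr (fun hh => h0 (he0.mp hh)) : PySem.Str.endswith (PySem.Str.lower b) "/instance" = false),
        (Bool.eq_false_iff.mpr (fun hh => h1 (he1.mp hh)) : PySem.Str.endswith (PySem.Str.lower b) "/message" = false),
        (Bool.eq_false_iff.mpr (fun hh => h2 (he2.mp hh)) : PySem.Str.endswith (PySem.Str.lower b) "/send" = false),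
        (Bool.eq_false_iff.mpr (fun hh => h3 (he3.mp hh)) : PySem.Str.endswith (PySem.Str.lower b) "/webhook" = false),
        (Bool.eq_false_iff.mpr (fun hh => h4 (he4.mp hh)) : PySem.Str.endswith (PySem.Str.lower b) "/group" = false),
        he5.mpr h5, if_true, Bool.false_eq_true, if_false]
      exact pvSliceEqHead b "/chat" "chat".toList rfl (by
        have := congrArg List.length h5; simpa using this)
    have hcont : ¬ pvSegments.contains (String.ofList ((b.toList.reverse.takeWhile (fun c => !(c == '/'))).map PySem.Chars.lowerChar).reverse) = true := by
      intro hcc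
      rw [pvContainsIff] at hcc
      rcases hcc with hc|hc|hc|hc|hc|hc
      · exact h0 (List.reverse_eq_iff.mp ((pvOfListEq _ _).mp hc))
      · exact h1 (List.reverse_eq_iff.mp ((pvOfListEq _ _).mp hc))
      · exact h2 (List.reverse_eq_iff.mp ((pvOfListEq _ _).mp hc))
      · exact h3 (List.reverse_eq_iff.mp ((pvOfListEq _ _).mp hc))
      · exact h4 (List.reverse_eq_iff.mp ((pvOfListEq _ _).mp hc))
      · exact h5 (List.reverse_eq_iff.mp ((pvOfListEq _ _).mp hc))
    rw [if_neg (fun hh => hcont hh.2)]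
    simp only [pvMarkers, pvSuffixLoop,
      (Bool.eq_false_iff.mpr (fun hh => h0 (he0.mp hh)) : PySem.Str.endswith (PySem.Str.lower b) "/instance" = false),
      (Bool.eq_false_iff.mpr (fun hh => h1 (he1.mp hh)) : PySem.Str.endswith (PySem.Str.lower b) "/message" = false),
      (Bool.eq_false_iff.mpr (fun hh => h2 (he2.mp hh)) : PySem.Str.endswith (PySem.Str.lower b) "/send" = false),
      (Bool.eq_false_iff.mpr (fun hh => h3 (he3.mp hh)) : PySem.Str.endswith (PySem.Str.lower b) "/webhook" = false),
      (Bool.eq_false_iff.mpr (fun hh => h4 (he4.mp hh)) : PySem.Str.endswith (PySem.Str.lower b) "/group" = false),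
      (Bool.eq_false_iff.mpr (fun hh => h5 (he5.mp hh)) : PySem.Str.endswith (PySem.Str.lower b) "/chat" = false),
      Bool.false_eq_true, if_false]


-- ===== VERDICT (by name: the statement is the Claim_ definition above) =====
theorem normalize_base_url_spec : Claim_equal_normalize_base_url := by
  intro base_url _
  unfold Spec_normalize_base_url normalize_base_url normalize_base_url_alt
  by_cases h : PySem.Str.strip base_url = ""
  · simp [h]
  · simp only [h]
    rw [pvCore]
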